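-- pv_equiv track=rewrite | github.com/ASSERT-KTH/Mokav | experiments/pynguin/c4b/return-lst/generated_tests/src_2415/7/src_2415.py | func
-- ===== SOURCE A (Python) =====
-- def func(*args):
-- 	ret_values = []
--
--
-- 	def direct(num):
-- 	    return (len(str(num)) == (str(num).count('4') + str(num).count('7')))
--
-- 	def indirect(num):
-- 	    for fac in [k for k in range(4, (num + 1)) if ((num % k) == 0)]:
-- 	        if direct(fac):
-- 	            return 'YES'
-- 	    return 'NO'
-- 	ret_values.append(indirect(int(args[0])))
--
-- 	return ret_values
-- ===== SOURCE B (Python) =====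
-- def func(*args):
--     num = int(args[0])
--
--     def lucky(k):
--         return k >= 4 and set(str(k)) <= {'4', '7'}
--
--     ans = 'NO'
--     i = 1
--     while i * i <= num:
--         if num % i == 0 and (lucky(i) or lucky(num // i)):
--             ans = 'YES'
--             break
--         i += 1
--     return [ans]
-- ===== Notes on version B (the rewrite author's own statement) =====
-- stated objective: faster
-- what changed: Instead of scanning every candidate divisor between four and num, B enumerates divisor pairs (i, num//i) for i up to sqrt(num) and tests each member for being a lucky (all-four/seven-digit) number, which is equivalent because every admissible divisor occurs in such a pair.
import Mathlib
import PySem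

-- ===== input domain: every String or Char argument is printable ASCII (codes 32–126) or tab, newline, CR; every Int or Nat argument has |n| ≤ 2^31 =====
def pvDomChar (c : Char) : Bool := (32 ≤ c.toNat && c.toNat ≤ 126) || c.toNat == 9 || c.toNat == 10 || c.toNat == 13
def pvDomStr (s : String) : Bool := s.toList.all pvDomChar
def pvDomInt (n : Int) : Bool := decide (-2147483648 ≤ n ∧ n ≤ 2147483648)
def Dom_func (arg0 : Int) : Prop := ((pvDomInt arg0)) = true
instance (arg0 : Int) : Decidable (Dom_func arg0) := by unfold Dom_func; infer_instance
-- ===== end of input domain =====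

-- B replaces A's scan of all candidates 4..num by the divisor-pair enumeration up to √num (asymptotically faster).

-- ===== PORT A =====
-- direct(num): len(str(num)) == str(num).count('4') + str(num).count('7')
def direct (num : Int) : Bool :=
  PySem.Str.len (PySem.Int.toStr num) ==
    ((PySem.Str.count (PySem.Int.toStr num) "4" : Int) + (PySem.Str.count (PySem.Int.toStr num) "7" : Int))

-- the 'for fac in …: if direct(fac): return "YES"' loop with its trailing 'return "NO"'
def indirectGo : List Int → String
  | [] => "NO"
  | fac :: rest => if direct fac then "YES" else indirectGo rest

def indirect (num : Int) : String :=
  indirectGo ((PySem.List.pyRange 4 (num + 1) 1).filter (fun k => PySem.Int.mod num k == 0))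

def func (arg0 : Int) : List String :=
  ([] : List String) ++ [indirect arg0]

-- ===== PORT B =====
-- lucky(k): k >= 4 and set(str(k)) <= {'4','7'}
def lucky (k : Int) : Bool :=
  decide (4 ≤ k) &&
    PySem.Set.issubset (PySem.Set.ofList (PySem.Int.toChars k)) (PySem.Set.ofList ['4', '7'])

-- the 'while i*i <= num' loop; returns whether it hit the break (ans = 'YES')
def bLoop (num i : Int) : Bool :=
  if h : i * i ≤ num then
    if PySem.Int.mod num i == 0 && (lucky i || lucky (PySem.Int.floordiv num i)) then true
    else bLoop num (i + 1)
  else false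
termination_by (num + 1 - i).toNat
decreasing_by
  have hle : i ≤ num := by
    by_cases h0 : i ≤ 0
    · have : (0 : Int) ≤ i * i := mul_self_nonneg i
      omega
    · have : i * 1 ≤ i * i := by
        apply mul_le_mul_of_nonneg_left _ (by omega)
        omega
      simpa using this.trans h
  omega

def func_alt (arg0 : Int) : List String :=
  [if bLoop arg0 1 then "YES" else "NO"]

-- ===== PRECONDITION & SPEC =====
def Spec_func (arg0 : Int) (out : List String) : Prop := out = func_alt arg0
instance (arg0 : Int) (out : List String) : Decidable (Spec_func arg0 out) := by unfold Spec_func; infer_instance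

-- ===== CLAIM (what is proved, stated in full; the proofs are below) =====
def Claim_equal_func : Prop := ∀ (arg0 : Int), Dom_func arg0 → Spec_func arg0 (func arg0)

-- ===== LEMMAS AND PROOFS =====

-- 'All47 num' : every character of str(num) is '4' or '7'
def All47 (num : Int) : Prop := ∀ c ∈ PySem.Int.toChars num, c = '4' ∨ c = '7'

theorem countGo_singleton (c : Char) :
    ∀ (fuel : Nat) (l : List Char) (acc : Nat), l.length ≤ fuel →
      PySem.Chars.count.go [c] fuel l acc = acc + l.count c := by
  intro fuel
  induction fuel with
  | zero =>
    intro l acc h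
    cases l with
    | nil => simp [PySem.Chars.count.go]
    | cons a t => simp at h
  | succ n ih =>
    intro l acc h
    cases l with
    | nil => simp [PySem.Chars.count.go]
    | cons a t =>
      rw [PySem.Chars.count.go]
      by_cases hc : a = c
      · subst hc
        simp [List.isPrefixOf, ih t (acc + 1) (by simpa using h)]
        omega
      · have hp : [c].isPrefixOf (a :: t) = false := by
          simp [List.isPrefixOf]
          exact fun hh => absurd hh.symm hc
        simp [hp, ih t acc (by simpa using h), hc]

theorem count_singleton (l : List Char) (c : Char) :
    PySem.Chars.count l [c] = l.count c := by
  simp [PySem.Chars.count, countGo_singleton c l.length l 0 (le_refl _)]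

theorem count47_le (l : List Char) : l.count '4' + l.count '7' ≤ l.length := by
  induction l with
  | nil => simp
  | cons a t ih =>
    simp only [List.count_cons, List.length_cons]
    rcases eq_or_ne a '4' with h4 | h4
    · subst h4; simp; omega
    · rcases eq_or_ne a '7' with h7 | h7
      · subst h7; simp; omega
      · simp [h4, h7]; omega

theorem count47_iff_all (l : List Char) :
    l.count '4' + l.count '7' = l.length ↔ ∀ c ∈ l, c = '4' ∨ c = '7' := by
  induction l with
  | nil => simp
  | cons a t ih =>
    have hle := count47_le t
    simp only [List.count_cons, List.length_cons, List.mem_cons, forall_eq_or_imp]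
    rcases eq_or_ne a '4' with h4 | h4
    · subst h4
      simp only [BEq.rfl, if_true, true_or, true_and]
      rw [← ih]
      constructor
      · intro h
        have h2 : ('4' == '7') = false := by decide
        simp [h2] at h
        omega
      · intro h
        have h2 : ('4' == '7') = false := by decide
        simp [h2]
        omega
    · rcases eq_or_ne a '7' with h7 | h7
      · subst h7
        simp only [or_true, true_and]
        rw [← ih]
        have h2 : ('7' == '4') = false := by decide
        simp [h2]
        omega
      · have h2 : (a == '4') = false := by simpa using h4
        have h3 : (a == '7') = false := by simpa using h7
        simp only [h2, h3, Bool.false_eq_true, if_false, add_zero]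
        constructor
        · intro h; omega
        · rintro ⟨(h | h), -⟩
          · exact absurd h h4
          · exact absurd h h7

theorem direct_iff (k : Int) : direct k = true ↔ All47 k := by
  unfold direct All47
  rw [beq_iff_eq]
  simp only [PySem.Str.len_eq, PySem.Str.count_eq, PySem.Int.toList_toStr]
  have h4 : ("4" : String).toList = ['4'] := rfl
  have h7 : ("7" : String).toList = ['7'] := rfl
  rw [h4, h7, count_singleton, count_singleton]
  rw [← count47_iff_all]
  constructor
  · intro h; omega
  · intro h; omega

theorem lucky_iff (k : Int) : lucky k = true ↔ 4 ≤ k ∧ All47 k := by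
  unfold lucky All47
  rw [Bool.and_eq_true, decide_eq_true_iff, PySem.Set.issubset_iff]
  constructor
  · rintro ⟨h1, h2⟩
    refine ⟨h1, fun c hc => ?_⟩
    have := h2 c (by rw [PySem.Set.mem_ofList]; exact hc)
    rw [PySem.Set.mem_ofList] at this
    simpa using this
  · rintro ⟨h1, h2⟩
    refine ⟨h1, fun c hc => ?_⟩
    rw [PySem.Set.mem_ofList] at hc ⊢
    simpa using h2 c hc

theorem indirectGo_eq (l : List Int) :
    indirectGo l = if l.any direct then "YES" else "NO" := by
  induction l with
  | nil => simp [indirectGo]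
  | cons a t ih =>
    by_cases h : direct a = true
    · simp [indirectGo, h]
    · simp [indirectGo, h, ih]

-- A's answer as an existence statement
theorem aAns_iff (num : Int) :
    ((PySem.List.pyRange 4 (num + 1) 1).filter (fun k => PySem.Int.mod num k == 0)).any direct = true ↔
      ∃ k, 4 ≤ k ∧ k ≤ num ∧ k ∣ num ∧ All47 k := by
  rw [List.any_eq_true]
  constructor
  · rintro ⟨k, hk, hd⟩
    rw [List.mem_filter] at hk
    obtain ⟨hmem, hmod⟩ := hk
    rw [PySem.List.mem_pyRange_one] at hmem
    rw [beq_iff_eq, PySem.Int.mod_eq_zero_iff_dvd] at hmod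
    exact ⟨k, hmem.1, by omega, hmod, (direct_iff k).mp hd⟩
  · rintro ⟨k, h4, hle, hdvd, hall⟩
    refine ⟨k, ?_, (direct_iff k).mpr hall⟩
    rw [List.mem_filter, PySem.List.mem_pyRange_one, beq_iff_eq, PySem.Int.mod_eq_zero_iff_dvd]
    exact ⟨⟨h4, by omega⟩, hdvd⟩

theorem sqLeSq {i j : Int} (h1 : 1 ≤ i) (hij : i ≤ j) : i * i ≤ j * j :=
  mul_le_mul hij hij (by omega) (by omega)

theorem selfLeSq {j : Int} (h1 : 1 ≤ j) : j ≤ j * j := by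
  have := mul_le_mul_of_nonneg_left h1 (by omega : (0:Int) ≤ j)
  simpa using this

theorem bLoop_iff :
    ∀ (n : Nat) (num i : Int), 1 ≤ i → (num + 1 - i).toNat ≤ n →
      (bLoop num i = true ↔
        ∃ j, i ≤ j ∧ j * j ≤ num ∧ PySem.Int.mod num j = 0 ∧
          (lucky j || lucky (PySem.Int.floordiv num j)) = true) := by
  intro n
  induction n with
  | zero =>
    intro num i hi hn
    have hni : num < i := by omega
    rw [bLoop]
    have hguard : ¬ i * i ≤ num := by
      intro h
      have := selfLeSq hi
      omega
    simp only [hguard, dite_false, Bool.false_eq_true, false_iff]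
    rintro ⟨j, hij, hjj, -, -⟩
    have h1j : (1 : Int) ≤ j := by omega
    have := selfLeSq h1j
    omega
  | succ n ih =>
    intro num i hi hn
    rw [bLoop]
    by_cases hguard : i * i ≤ num
    · have hile : i ≤ num := by
        have := selfLeSq hi
        omega
      simp only [hguard, dite_true]
      by_cases hcond : (PySem.Int.mod num i == 0 && (lucky i || lucky (PySem.Int.floordiv num i))) = true
      · rw [if_pos hcond]
        simp only [true_iff]
        rw [Bool.and_eq_true, beq_iff_eq] at hcond
        exact ⟨i, le_refl i, hguard, hcond.1, hcond.2⟩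
      · rw [if_neg hcond]
        rw [ih num (i + 1) (by omega) (by omega)]
        constructor
        · rintro ⟨j, hij, h⟩; exact ⟨j, by omega, h⟩
        · rintro ⟨j, hij, hjj, hm, hl⟩
          refine ⟨j, ?_, hjj, hm, hl⟩
          rcases eq_or_lt_of_le hij with rfl | hlt
          · exfalso
            apply hcond
            rw [Bool.and_eq_true, beq_iff_eq]
            exact ⟨hm, hl⟩
          · omega
    · simp only [hguard, dite_false, Bool.false_eq_true, false_iff]
      rintro ⟨j, hij, hjj, -, -⟩
      exact hguard ((sqLeSq hi hij).trans hjj)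

-- the mathematical heart: a lucky divisor in [4, num] exists iff the √num-scan finds one
theorem exists_iff (num : Int) :
    (∃ k, 4 ≤ k ∧ k ≤ num ∧ k ∣ num ∧ All47 k) ↔
      (∃ j, 1 ≤ j ∧ j * j ≤ num ∧ PySem.Int.mod num j = 0 ∧
        (lucky j || lucky (PySem.Int.floordiv num j)) = true) := by
  constructor
  · rintro ⟨k, h4, hle, hdvd, hall⟩
    have hk0 : 0 < k := by omega
    have hnum0 : 0 < num := by omega
    have hlk : lucky k = true := (lucky_iff k).mpr ⟨h4, hall⟩
    set q := num / k with hq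
    have hmul : k * q = num := Int.mul_ediv_cancel' hdvd
    have hq1 : 1 ≤ q := by
      by_contra hq1
      have hq0 : q ≤ 0 := by omega
      have : k * q ≤ k * 0 := mul_le_mul_of_nonneg_left hq0 (by omega)
      simp at this
      omega
    by_cases hkk : k * k ≤ num
    · refine ⟨k, by omega, hkk, ?_, ?_⟩
      · rw [PySem.Int.mod_eq_zero_iff_dvd]; exact hdvd
      · rw [Bool.or_eq_true]; left; exact hlk
    · refine ⟨q, hq1, ?_, ?_, ?_⟩
      · have hkk2 : num < k * k := by omega
        have hqk : q < k := lt_of_mul_lt_mul_left (by rw [hmul]; exact hkk2) (by omega)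
        have : q * q < k * q := mul_lt_mul_of_pos_right hqk (by omega)
        omega
      · rw [PySem.Int.mod_eq_zero_iff_dvd]
        exact ⟨k, by rw [← hmul]; ring⟩
      · have hfd : PySem.Int.floordiv num q = k := by
          rw [PySem.Int.floordiv_eq_ediv_of_pos (by omega)]
          rw [← hmul, Int.mul_ediv_cancel _ (by omega)]
        rw [Bool.or_eq_true, hfd]; right; exact hlk
  · rintro ⟨j, hj1, hjj, hmod, hl⟩
    rw [PySem.Int.mod_eq_zero_iff_dvd] at hmod
    rw [Bool.or_eq_true] at hl
    rcases hl with hl | hl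
    · obtain ⟨h4, hall⟩ := (lucky_iff j).mp hl
      exact ⟨j, h4, (selfLeSq hj1).trans hjj, hmod, hall⟩
    · have hnum0 : 0 < num := by
        by_contra hn
        have hn0 : num ≤ 0 := by omega
        obtain ⟨h4, -⟩ := (lucky_iff _).mp hl
        have hfde : PySem.Int.floordiv num j = num / j := PySem.Int.floordiv_eq_ediv_of_pos (by omega)
        rw [hfde] at h4
        have hd : num / j ≤ 0 := Int.ediv_nonpos_of_nonpos_of_neg hn0 hj1
        omega
      have hfd : PySem.Int.floordiv num j = num / j := PySem.Int.floordiv_eq_ediv_of_pos (by omega)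
      rw [hfd] at hl
      obtain ⟨h4, hall⟩ := (lucky_iff _).mp hl
      set q := num / j with hq
      have hmul : j * q = num := Int.mul_ediv_cancel' hmod
      refine ⟨q, h4, ?_, ⟨j, by rw [← hmul]; ring⟩, hall⟩
      have : 1 * q ≤ j * q := mul_le_mul_of_nonneg_right hj1 (by omega)
      omega

-- ===== VERDICT (by name: the statement is the Claim_ definition above) =====
theorem func_spec : Claim_equal_func := by
  intro arg0 _
  unfold Spec_func func func_alt indirect
  rw [indirectGo_eq]
  have hA := aAns_iff arg0
  have hB := bLoop_iff (arg0 + 1 - 1).toNat arg0 1 (by omega) (le_refl _)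
  simp only [List.nil_append]
  congr 1
  by_cases h : ((PySem.List.pyRange 4 (arg0 + 1) 1).filter (fun k => PySem.Int.mod arg0 k == 0)).any direct = true
  · rw [h]
    have : bLoop arg0 1 = true := by
      rw [hB]
      obtain ⟨j, h⟩ := (exists_iff arg0).mp (hA.mp h)
      exact ⟨j, h⟩
    rw [this]
  · rw [Bool.not_eq_true] at h
    rw [h]
    have : bLoop arg0 1 = false := by
      rw [Bool.eq_false_iff, Ne, hB]
      intro hex
      have := hA.mpr ((exists_iff arg0).mpr hex)
      rw [h] at this
      exact absurd this (by simp)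
    rw [this]
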